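-- pv_equiv track=rewrite | github.com/cordlessvii/garmin-to-notion | garmin-activities.py | format_training_message
-- ===== SOURCE A (Python) =====
-- def format_training_message(message):
--     messages = {
--         'NO_': 'No Benefit',
--         'MINOR_': 'Some Benefit',
--         'RECOVERY_': 'Recovery',
--         'MAINTAINING_': 'Maintaining',
--         'IMPROVING_': 'Impacting',
--         'IMPACTING_': 'Impacting',
--         'HIGHLY_': 'Highly Impacting',
--         'OVERREACHING_': 'Overreaching'
--     }
--     for key, value in messages.items():
--         if message.startswith(key):
--             return value
--     return message
-- ===== SOURCE B (Python) =====
-- def format_training_message(message):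
--     messages = {
--         'NO_': 'No Benefit',
--         'MINOR_': 'Some Benefit',
--         'RECOVERY_': 'Recovery',
--         'MAINTAINING_': 'Maintaining',
--         'IMPROVING_': 'Impacting',
--         'IMPACTING_': 'Impacting',
--         'HIGHLY_': 'Highly Impacting',
--         'OVERREACHING_': 'Overreaching'
--     }
--     idx = message.find('_')
--     if idx == -1:
--         return message
--     return messages.get(message[:idx + 1], message)
-- ===== Notes on version B (the rewrite author's own statement) =====
-- stated objective: simpler
-- what changed: Replaces the 8-way startswith scan over the dict with one computed-key lookup: take the prefix up to and including the first underscore and look it up once; no underscore falls through to the original message.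
import Mathlib
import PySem

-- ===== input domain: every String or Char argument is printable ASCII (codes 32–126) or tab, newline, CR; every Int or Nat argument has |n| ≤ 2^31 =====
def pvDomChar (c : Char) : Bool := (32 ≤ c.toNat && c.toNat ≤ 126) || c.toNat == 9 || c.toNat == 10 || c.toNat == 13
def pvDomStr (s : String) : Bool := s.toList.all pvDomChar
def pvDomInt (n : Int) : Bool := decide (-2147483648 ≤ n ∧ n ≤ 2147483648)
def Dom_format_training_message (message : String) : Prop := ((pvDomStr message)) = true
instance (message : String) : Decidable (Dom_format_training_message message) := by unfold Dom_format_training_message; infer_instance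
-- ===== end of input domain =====

-- B replaces A's per-key startswith scan with a single computed-key dict lookup on the
-- prefix up to (and including) the first underscore; objective: simpler.

-- ===== PORT A =====
-- the Python dict literal, as an association list in insertion order
def ftmPairs : List (String × String) :=
  [("NO_", "No Benefit"), ("MINOR_", "Some Benefit"), ("RECOVERY_", "Recovery"),
   ("MAINTAINING_", "Maintaining"), ("IMPROVING_", "Impacting"), ("IMPACTING_", "Impacting"),
   ("HIGHLY_", "Highly Impacting"), ("OVERREACHING_", "Overreaching")]

-- the 'for key, value in messages.items(): if message.startswith(key): return value' loop
def ftmLoop (message : String) : List (String × String) → String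
  | [] => message
  | (k, v) :: rest => if PySem.Str.startswith message k then v else ftmLoop message rest

def format_training_message (message : String) : String :=
  ftmLoop message ftmPairs

-- ===== PORT B =====
def format_training_message_alt (message : String) : String :=
  let messages := PySem.Dict.ofList
    [("NO_", "No Benefit"), ("MINOR_", "Some Benefit"), ("RECOVERY_", "Recovery"),
     ("MAINTAINING_", "Maintaining"), ("IMPROVING_", "Impacting"), ("IMPACTING_", "Impacting"),
     ("HIGHLY_", "Highly Impacting"), ("OVERREACHING_", "Overreaching")]
  let idx := PySem.Str.find message "_"
  if idx = -1 then message
  else messages.getD (PySem.Str.slice message none (some (idx + 1))) message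

-- ===== PRECONDITION & SPEC =====
def Spec_format_training_message (message : String) (out : String) : Prop := out = format_training_message_alt message
instance (message : String) (out : String) : Decidable (Spec_format_training_message message out) := by unfold Spec_format_training_message; infer_instance

-- ===== CLAIM (what is proved, stated in full; the proofs are below) =====
def Claim_equal_format_training_message : Prop := ∀ (message : String), Dom_format_training_message message → Spec_format_training_message message (format_training_message message)

-- ===== LEMMAS AND PROOFS =====

theorem ftm_singleton_prefix_iff (a : Char) (xs : List Char) :
    [a] <+: xs ↔ xs[0]? = some a := by
  constructor
  · rintro ⟨t, rfl⟩; rfl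
  · intro h
    cases xs with
    | nil => simp at h
    | cons b t =>
      simp at h
      exact ⟨t, by simp [h]⟩

theorem ftm_startswith_false (l k : List Char)
    (hmem : '_' ∈ k) (hno : ¬ ['_'] <:+: l) :
    PySem.Chars.startswith l k = false := by
  rw [← Bool.not_eq_true, PySem.Chars.startswith_iff]
  rintro ⟨t, rfl⟩
  obtain ⟨s, t', rfl⟩ := List.append_of_mem hmem
  exact hno ⟨s, t' ++ t, by simp⟩

-- if the first underscore of l is at index m, then for a key w++['_'] with no underscore
-- in w, 'l starts with the key' is exactly 'the prefix l.take (m+1) equals the key'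
theorem ftm_key_iff (l : List Char) (m : Nat) (w : List Char)
    (hw : '_' ∉ w) (hm : l[m]? = some '_') (hmin : ∀ i < m, l[i]? ≠ some '_') :
    (w ++ ['_'] <+: l) ↔ (l.take (m + 1) = w ++ ['_']) := by
  constructor
  · rintro ⟨t, rfl⟩
    have hwm : w.length = m := by
      rcases Nat.lt_trichotomy w.length m with hlt | heq | hgt
      · exfalso
        apply hmin w.length hlt
        rw [List.append_assoc, List.getElem?_append_right (le_refl _)]
        simp
      · exact heq
      · exfalso
        rw [List.append_assoc, List.getElem?_append (l₁ := w)] at hm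
        simp only [if_pos hgt] at hm
        have : '_' ∈ w := by
          have := List.getElem?_eq_some_iff.mp hm
          obtain ⟨hlt', hv⟩ := this
          exact hv ▸ List.getElem_mem _
        exact hw this
    rw [← hwm]
    exact List.take_left' (by simp)
  · intro h
    rw [← h]
    exact List.take_prefix _ _

-- A's scan over the items equals B's first-match lookup, given that for every key
-- 'message startswith key' agrees with 'key == computed prefix'
theorem ftm_loop_eq_get (message key : String) (ps : List (String × String))
    (hiff : ∀ kv ∈ ps, PySem.Str.startswith message kv.1 = (key == kv.1)) :
    ftmLoop message ps = ((PySem.Dict.mk ps).get? key).getD message := by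
  induction ps with
  | nil => simp [ftmLoop, PySem.Dict.get?]
  | cons kv rest ih =>
    obtain ⟨k, v⟩ := kv
    rw [ftmLoop, PySem.Dict.get?_mk_cons]
    have hk := hiff (k, v) (List.mem_cons_self)
    simp only at hk
    rw [hk]
    have hcomm : (k == key) = (key == k) := by
      simp [eq_comm]
    rw [hcomm]
    by_cases h : key = k
    · simp [h]
    · simp only [beq_iff_eq, if_neg h]
      exact ih fun kv hkv => hiff kv (List.mem_cons_of_mem _ hkv)

theorem format_training_message_eq (message : String) :
    format_training_message message = format_training_message_alt message := by
  unfold format_training_message format_training_message_alt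
  set l := message.toList with hl
  by_cases hfind : PySem.Str.find message "_" = -1
  · -- no underscore anywhere: every startswith fails, B falls through
    rw [if_pos hfind]
    have hno : ¬ ['_'] <:+: l := by
      rw [← PySem.Chars.find_eq_neg_one_iff]
      simpa [PySem.Str.find_eq] using hfind
    have hsw : ∀ k : String, '_' ∈ k.toList →
        PySem.Str.startswith message k = false := fun k hk => by
      rw [PySem.Str.startswith_eq]
      exact ftm_startswith_false l k.toList hk hno
    simp only [ftmPairs, ftmLoop]
    rw [hsw "NO_" (by decide), hsw "MINOR_" (by decide), hsw "RECOVERY_" (by decide),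
        hsw "MAINTAINING_" (by decide), hsw "IMPROVING_" (by decide),
        hsw "IMPACTING_" (by decide), hsw "HIGHLY_" (by decide),
        hsw "OVERREACHING_" (by decide)]
    simp
  · rw [if_neg hfind]
    -- the first underscore is at index m
    have h0 : 0 ≤ PySem.Str.find message "_" := by
      have h1 := PySem.Chars.neg_one_le_find message.toList "_".toList
      rw [← PySem.Str.find_eq] at h1
      omega
    set m : Nat := (PySem.Str.find message "_").toNat with hmdef
    have hfm : PySem.Str.find message "_" = (m : Int) := (Int.toNat_of_nonneg h0).symm
    have hspec := PySem.Chars.find_spec (s := l) (sub := "_".toList)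
      (by rw [← PySem.Str.find_eq]; exact h0)
    rw [← PySem.Str.find_eq, hfm] at hspec
    simp only [Int.toNat_natCast] at hspec
    obtain ⟨hpre, hminp⟩ := hspec
    have hm : l[m]? = some '_' := by
      have := (ftm_singleton_prefix_iff '_' (l.drop m)).mp (by simpa using hpre)
      simpa [List.getElem?_drop] using this
    have hmin : ∀ i < m, l[i]? ≠ some '_' := by
      intro i hi hcontra
      exact hminp i hi (by
        apply (ftm_singleton_prefix_iff '_' (l.drop i)).mpr
        simpa [List.getElem?_drop] using hcontra)
    -- the computed key is the prefix of length m+1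
    set key : String := PySem.Str.slice message none (some (PySem.Str.find message "_" + 1)) with hkey
    have hkeyList : key.toList = l.take (m + 1) := by
      rw [hkey, PySem.Str.toList_slice, PySem.Chars.slice_eq_listSlice, hfm,
          PySem.List.slice_to _ (by positivity)]
      have hmn : ((m : Int) + 1).toNat = m + 1 := by omega
      rw [hmn, hl]
    -- per-key agreement between startswith and key equality
    have hiff : ∀ kv ∈ ftmPairs, PySem.Str.startswith message kv.1 = (key == kv.1) := by
      intro kv hkv
      rw [Bool.eq_iff_iff, PySem.Str.startswith_eq, PySem.Chars.startswith_iff,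
          beq_iff_eq, ← String.toList_inj, hkeyList]
      have hsplit : kv.1.toList = kv.1.toList.dropLast ++ ['_'] ∧ '_' ∉ kv.1.toList.dropLast := by
        fin_cases hkv <;> exact ⟨by decide, by decide⟩
      obtain ⟨hweq, hwnot⟩ := hsplit
      rw [hweq]
      exact ftm_key_iff l m _ hwnot hm hmin
    rw [ftm_loop_eq_get message key ftmPairs hiff]
    simp only [PySem.Dict.getD]
    have hD : PySem.Dict.ofList
      [("NO_", "No Benefit"), ("MINOR_", "Some Benefit"), ("RECOVERY_", "Recovery"),
       ("MAINTAINING_", "Maintaining"), ("IMPROVING_", "Impacting"), ("IMPACTING_", "Impacting"),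
       ("HIGHLY_", "Highly Impacting"), ("OVERREACHING_", "Overreaching")] = PySem.Dict.mk ftmPairs := by
      decide
    rw [hD]

-- ===== VERDICT (by name: the statement is the Claim_ definition above) =====
theorem format_training_message_spec : Claim_equal_format_training_message := by
  intro message _
  unfold Spec_format_training_message
  exact format_training_message_eq message
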